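-- pv_equiv track=rewrite | github.com/Bobybyk/UPC-Studies | Licence_Informatique/L2/S4/EA2/coursEA42019-2020/clusters.py | clusters
-- ===== SOURCE A (Python) =====
-- def clusters(T, filtre=1) :
--   res = []
--   tmp = 0
--   for elt in T :
--     if elt == 0 :
--       if tmp > filtre : res, tmp = res + [tmp], 0
--     else : tmp += 1
--   return sorted(res, reverse=True)
-- ===== SOURCE B (Python) =====
-- def clusters(T, filtre=1):
--     # Phase 1: cumulative count of nonzero elements, recorded at each zero position.
--     counts = []
--     c = 0
--     for v in T:
--         if v == 0:
--             counts.append(c)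
--         else:
--             c += 1
--     # Phase 2: greedy scan over the recorded counts, flushing when the count
--     # since the last flush exceeds the threshold.
--     res = []
--     last = 0
--     for k in counts:
--         if k - last > filtre:
--             res.append(k - last)
--             last = k
--     return sorted(res, reverse=True)
-- ===== Notes on version B (the rewrite author's own statement) =====
-- stated objective: alternative
-- what changed: Replaces A's single-pass state machine with a two-phase decomposition: first record the cumulative nonzero count at every zero position, then a greedy flush scan over those counts; sorting descending is unchanged.
import Mathlib
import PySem

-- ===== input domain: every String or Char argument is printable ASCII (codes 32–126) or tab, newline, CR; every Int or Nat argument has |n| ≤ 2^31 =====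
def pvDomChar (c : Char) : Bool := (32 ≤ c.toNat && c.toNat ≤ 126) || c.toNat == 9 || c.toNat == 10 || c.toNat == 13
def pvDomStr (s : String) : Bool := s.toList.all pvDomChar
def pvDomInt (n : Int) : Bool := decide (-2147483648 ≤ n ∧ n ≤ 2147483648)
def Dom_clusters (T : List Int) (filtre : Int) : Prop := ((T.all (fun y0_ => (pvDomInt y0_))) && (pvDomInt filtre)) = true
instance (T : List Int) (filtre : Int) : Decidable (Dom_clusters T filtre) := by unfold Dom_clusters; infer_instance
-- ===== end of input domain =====

-- B replaces A's single-pass state machine by a two-phase decomposition (record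
-- cumulative nonzero counts at zeros, then a greedy flush scan); same cost, clearer.

-- ===== PORT A =====
def clusters (T : List Int) (filtre : Int) : List Int :=
  PySem.List.sorted
    (T.foldl (fun (st : List Int × Int) elt =>
      if elt == 0 then
        (if st.2 > filtre then (st.1 ++ [st.2], 0) else st)
      else (st.1, st.2 + 1)) ([], 0)).1
    (fun x => x) true

-- ===== PORT B =====
def clusters_alt (T : List Int) (filtre : Int) : List Int :=
  PySem.List.sorted
    (((T.foldl (fun (st : List Int × Int) v =>
        if v == 0 then (st.1 ++ [st.2], st.2) else (st.1, st.2 + 1)) ([], 0)).1).foldl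
      (fun (st : List Int × Int) k =>
        if k - st.2 > filtre then (st.1 ++ [k - st.2], k) else st) ([], 0)).1
    (fun x => x) true

-- ===== PRECONDITION & SPEC =====
def Spec_clusters (T : List Int) (filtre : Int) (out : List Int) : Prop := out = clusters_alt T filtre
instance (T : List Int) (filtre : Int) (out : List Int) : Decidable (Spec_clusters T filtre out) := by unfold Spec_clusters; infer_instance

-- ===== CLAIM (what is proved, stated in full; the proofs are below) =====
def Claim_equal_clusters : Prop := ∀ (T : List Int) (filtre : Int), Dom_clusters T filtre → Spec_clusters T filtre (clusters T filtre)

-- ===== LEMMAS AND PROOFS =====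

-- recursive form of B's first pass (counts recorded at zeros)
def pvCounts : List Int → Int → List Int
  | [], _ => []
  | x :: xs, c => if x == 0 then c :: pvCounts xs c else pvCounts xs (c + 1)

lemma phase1_foldl (T : List Int) : ∀ (acc : List Int) (c : Int),
    (T.foldl (fun (st : List Int × Int) v =>
      if v == 0 then (st.1 ++ [st.2], st.2) else (st.1, st.2 + 1)) (acc, c)).1
    = acc ++ pvCounts T c := by
  induction T with
  | nil => intro acc c; simp [pvCounts]
  | cons x xs ih =>
    intro acc c
    by_cases hx : x = 0
    · subst hx
      simp only [List.foldl_cons, pvCounts, beq_self_eq_true, ite_true]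
      rw [ih]; simp
    · have hb : (x == 0) = false := by simpa using hx
      simp only [List.foldl_cons, pvCounts, hb, Bool.false_eq_true, if_false]
      exact ih acc (c + 1)

-- A's fold equals B's second pass over the recorded counts
lemma foldA_eq_scan (filtre : Int) (T : List Int) : ∀ (res : List Int) (tmp c : Int),
    (T.foldl (fun (st : List Int × Int) elt =>
      if elt == 0 then
        (if st.2 > filtre then (st.1 ++ [st.2], 0) else st)
      else (st.1, st.2 + 1)) (res, tmp)).1
    = ((pvCounts T c).foldl (fun (st : List Int × Int) k =>
        if k - st.2 > filtre then (st.1 ++ [k - st.2], k) else st) (res, c - tmp)).1 := by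
  induction T with
  | nil => intro res tmp c; simp [pvCounts]
  | cons x xs ih =>
    intro res tmp c
    by_cases hx : x = 0
    · subst hx
      have hc : c - (c - tmp) = tmp := by ring
      simp only [List.foldl_cons, pvCounts, beq_self_eq_true, ite_true, hc]
      by_cases h : tmp > filtre
      · rw [if_pos h, if_pos h, ih _ 0 c]; norm_num
      · rw [if_neg h, if_neg h, ih _ tmp c]
    · have hb : (x == 0) = false := by simpa using hx
      have hc : (c + 1) - (tmp + 1) = c - tmp := by ring
      simp only [List.foldl_cons, pvCounts, hb, Bool.false_eq_true, if_false]
      rw [ih res (tmp + 1) (c + 1), hc]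

-- ===== VERDICT (by name: the statement is the Claim_ definition above) =====
theorem clusters_spec : Claim_equal_clusters := by
  intro T filtre _
  unfold Spec_clusters clusters clusters_alt
  rw [phase1_foldl T [] 0]
  simp only [List.nil_append]
  rw [foldA_eq_scan filtre T [] 0 0]
  norm_num
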